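-- pv_equiv track=rewrite | github.com/vycdev/Morpheus | tools/import_dc_json.py | fnv1a64_over_utf16_units
-- ===== SOURCE A (Python) =====
-- def fnv1a64_over_utf16_units(s: str) -> int:
--     """FNV-1a 64 over UTF-16 code units like the C# implementation.
--
--     For each char, process low byte then high byte.
--     """
--     offset = 14695981039346656037
--     prime = 1099511628211
--     h = offset
--     for ch in s:
--         c = ord(ch)
--         low = c & 0xFF
--         high = (c >> 8) & 0xFF
--         h ^= low
--         h = (h * prime) & 0xFFFFFFFFFFFFFFFF
--         h ^= high
--         h = (h * prime) & 0xFFFFFFFFFFFFFFFF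
--     return h
-- ===== SOURCE B (Python) =====
-- def fnv1a64_over_utf16_units(s: str) -> int:
--     """FNV-1a 64 over UTF-16 code units: first build the little-endian byte
--     stream of the code units explicitly, then fold one uniform FNV-1a step
--     per byte."""
--     stream = bytearray()
--     for ch in s:
--         c = ord(ch)
--         stream.append(c & 0xFF)
--         stream.append((c >> 8) & 0xFF)
--     h = 14695981039346656037
--     for b in stream:
--         h = ((h ^ b) * 1099511628211) & 0xFFFFFFFFFFFFFFFF
--     return h
-- ===== Notes on version B (the rewrite author's own statement) =====
-- stated objective: alternative
-- what changed: A hashes in one combined pass with two inline xor/multiply steps per char; B first materialises the little-endian UTF-16 byte stream into a bytearray and then folds one uniform FNV-1a step per byte over it.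
import Mathlib
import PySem

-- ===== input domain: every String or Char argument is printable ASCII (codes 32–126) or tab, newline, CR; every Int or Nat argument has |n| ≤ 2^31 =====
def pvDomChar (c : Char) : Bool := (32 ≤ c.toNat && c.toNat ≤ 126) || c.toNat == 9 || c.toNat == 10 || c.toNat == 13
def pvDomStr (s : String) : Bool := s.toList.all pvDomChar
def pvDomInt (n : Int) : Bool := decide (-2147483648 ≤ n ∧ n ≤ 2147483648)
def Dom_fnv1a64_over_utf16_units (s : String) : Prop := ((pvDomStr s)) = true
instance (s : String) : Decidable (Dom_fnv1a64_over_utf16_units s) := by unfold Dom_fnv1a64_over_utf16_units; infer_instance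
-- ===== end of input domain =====

-- ===== PORT A =====
-- A: one combined pass over the chars, two inline xor/multiply steps per char.
def fnvStepA (h : Nat) (ch : Char) : Nat :=
  let c := ch.toNat
  let low := c &&& 0xFF
  let high := (c >>> 8) &&& 0xFF
  let h1 := ((h ^^^ low) * 1099511628211) &&& 0xFFFFFFFFFFFFFFFF
  ((h1 ^^^ high) * 1099511628211) &&& 0xFFFFFFFFFFFFFFFF

def fnv1a64_over_utf16_units (s : String) : Int :=
  ((s.toList.foldl fnvStepA 14695981039346656037 : Nat) : Int)

-- ===== PORT B =====
-- B: build the little-endian UTF-16 byte stream first, then one uniform FNV-1a step per byte.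
def fnvBytesB (s : String) : List Nat :=
  s.toList.foldl (fun acc ch =>
    let c := ch.toNat
    acc ++ [c &&& 0xFF, (c >>> 8) &&& 0xFF]) []

def fnvStepB (h : Nat) (b : Nat) : Nat :=
  ((h ^^^ b) * 1099511628211) &&& 0xFFFFFFFFFFFFFFFF

def fnv1a64_over_utf16_units_alt (s : String) : Int :=
  (((fnvBytesB s).foldl fnvStepB 14695981039346656037 : Nat) : Int)

-- ===== PRECONDITION & SPEC =====
def Spec_fnv1a64_over_utf16_units (s : String) (out : Int) : Prop := out = fnv1a64_over_utf16_units_alt s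
instance (s : String) (out : Int) : Decidable (Spec_fnv1a64_over_utf16_units s out) := by unfold Spec_fnv1a64_over_utf16_units; infer_instance

-- ===== CLAIM (what is proved, stated in full; the proofs are below) =====
def Claim_equal_fnv1a64_over_utf16_units : Prop := ∀ (s : String), Dom_fnv1a64_over_utf16_units s → Spec_fnv1a64_over_utf16_units s (fnv1a64_over_utf16_units s)

-- ===== LEMMAS AND PROOFS =====

-- B's byte stream over an accumulator is the accumulator followed by each char's two bytes.
theorem fnvBytes_acc (l : List Char) (acc : List Nat) :
    l.foldl (fun acc ch =>
      let c := ch.toNat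
      acc ++ [c &&& 0xFF, (c >>> 8) &&& 0xFF]) acc
    = acc ++ l.flatMap (fun ch => [ch.toNat &&& 0xFF, (ch.toNat >>> 8) &&& 0xFF]) := by
  induction l generalizing acc with
  | nil => simp
  | cons a t ih => simp [ih, List.flatMap_cons]

-- folding B's uniform step over the byte stream equals A's combined per-char step.
-- one char's combined A-step equals two B-steps on its two bytes.
theorem fnvStep_eq (h : Nat) (a : Char) :
    fnvStepB (fnvStepB h (a.toNat &&& 0xFF)) ((a.toNat >>> 8) &&& 0xFF) = fnvStepA h a := rfl

theorem fold_flatMap (l : List Char) (h : Nat) :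
    (l.flatMap (fun ch => [ch.toNat &&& 0xFF, (ch.toNat >>> 8) &&& 0xFF])).foldl fnvStepB h
    = l.foldl fnvStepA h := by
  induction l generalizing h with
  | nil => rfl
  | cons a t ih =>
    rw [List.flatMap_cons, List.foldl_append, List.foldl_cons, List.foldl_cons, List.foldl_nil,
      ih, List.foldl_cons, fnvStep_eq]

-- ===== VERDICT (by name: the statement is the Claim_ definition above) =====
theorem fnv1a64_over_utf16_units_spec : Claim_equal_fnv1a64_over_utf16_units := by
  intro s _
  unfold Spec_fnv1a64_over_utf16_units fnv1a64_over_utf16_units fnv1a64_over_utf16_units_alt fnvBytesB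
  rw [fnvBytes_acc, List.nil_append, fold_flatMap]
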